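-- pv_equiv track=rewrite | github.com/uw-bionlp/uwbionlp-parser | deident/src/utils_nlp.py | convert_conll_from_bio_to_bioes
-- ===== SOURCE A (Python) =====
-- def end_current_entity(previous_label_without_bio, current_entity_length, new_labels, i):
--     '''
--     Helper function for bio_to_bioes
--     '''
--     if current_entity_length == 0:
--         return
--     if current_entity_length == 1:
--         new_labels[i - 1] = 'S-' + previous_label_without_bio
--     else: #elif current_entity_length > 1
--         new_labels[i - 1] = 'E-' + previous_label_without_bio
--
-- def remove_bio_from_label_name(label_name):
--     if label_name[:2] in ['B-', 'I-', 'E-', 'S-']: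
--         new_label_name = label_name[2:]
--     else:
--         assert(label_name == 'O')
--         new_label_name = label_name
--     return new_label_name
--
-- def bio_to_bioes(labels):
--     previous_label_without_bio = 'O'
--     current_entity_length = 0
--     new_labels = labels.copy()
--     for i, label in enumerate(labels):
--         label_without_bio = remove_bio_from_label_name(label)
--         # end the entity
--         if current_entity_length > 0 and (label[:2] in ['B-', 'O'] or label[:2] == 'I-' and previous_label_without_bio != label_without_bio):
--             end_current_entity(previous_label_without_bio, current_entity_length, new_labels, i)
--             current_entity_length = 0
--         if label[:2] == 'B-':
--             current_entity_length = 1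
--         elif label[:2] == 'I-':
--             if current_entity_length == 0:
--                 new_labels[i] = 'B-' + label_without_bio
--             current_entity_length += 1
--         previous_label_without_bio = label_without_bio
--     end_current_entity(previous_label_without_bio, current_entity_length, new_labels, i + 1)
--     return new_labels
--
-- def convert_conll_from_bio_to_bioes(text):
--     output = ''
--     labels = []
--     split_lines = []
--     for line in text.splitlines():
--         split_line = line.strip().split(' ')
--         # New sentence
--         if len(split_line) == 0 or len(split_line[0]) == 0 or '-DOCSTART-' in split_line[0]:
--             output = output_conll_lines_with_bioes(split_lines, labels, output)
--             output += line
--             continue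
--         label = split_line[-1]
--         labels.append(label)
--         split_lines.append(split_line)
--     output = output_conll_lines_with_bioes(split_lines, labels, output)
--
--     return output
--
-- def output_conll_lines_with_bioes(split_lines, labels, output):
--     '''
--     Helper function for convert_conll_from_bio_to_bioes
--     '''
--     if labels == []:
--         return
--     new_labels = bio_to_bioes(labels)
--     assert(len(new_labels) == len(split_lines))
--     for split_line, new_label in zip(split_lines, new_labels):
--         output += ' '.join(split_line + [new_label]) + '\n'
--     del labels[:]
--     del split_lines[:]
--     return output
-- ===== SOURCE B (Python) =====
-- def convert_conll_from_bio_to_bioes(text):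
--     parts = []
--     sentence = []
--     for line in text.splitlines():
--         tokens = line.strip().split(' ')
--         if tokens[0] == '' or '-DOCSTART-' in tokens[0]:
--             parts.extend(_render_sentence(sentence))
--             sentence = []
--             parts.append(line)
--         else:
--             sentence.append(tokens)
--     parts.extend(_render_sentence(sentence))
--     return ''.join(parts)
--
-- def _render_sentence(sentence):
--     labels = [tokens[-1] for tokens in sentence]
--     return [' '.join(tokens + [label]) + '\n'
--             for tokens, label in zip(sentence, _bio_to_bioes(labels))]
--
-- def _bio_to_bioes(labels):
--     """Emit each label's BIOES form in one forward pass: an entity's end is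
--     decided by looking at the following label (padding with a closing 'O'),
--     so every slot is final as soon as it is emitted."""
--     for lab in labels:
--         assert lab == 'O' or lab[:2] in ('B-', 'I-', 'E-', 'S-'), \
--             'not a BIO/BIOES label: %r' % lab
--     new = []
--     inside = False      # an entity is open here
--     single = False      # ... and it spans a single token so far
--     prev = 'O'          # type of the preceding label
--     for lab, nxt in zip(labels, labels[1:] + ['O']):
--         t = lab if lab == 'O' else lab[2:]
--         if lab.startswith('B-'):
--             cur, inside, single = lab, True, True
--         elif lab.startswith('I-'):
--             if inside and prev == t:
--                 cur, single = lab, False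
--             else:                      # orphan I-: it starts the entity
--                 cur, inside, single = 'B-' + t, True, True
--         else:
--             cur = lab
--             inside = inside and lab != 'O'
--         prev = t
--         n = nxt if nxt == 'O' else nxt[2:]
--         ends = inside and (nxt == 'O' or nxt.startswith('B-')
--                            or (nxt.startswith('I-') and n != t))
--         new.append((('S-' if single else 'E-') + t) if ends else cur)
--     return new
-- ===== Notes on version B (the rewrite author's own statement) =====
-- stated objective: alternative
-- what changed: A's lookback state machine (an entity-length accumulator that retro-patches new_labels[i-1] after the entity has already been emitted) is replaced by a single forward pass that finalizes every label as it is emitted, deciding entity ends by one-token lookahead (padding with a closing 'O'), and the output is assembled as a list of parts joined once instead of repeated string concatenation; …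
-- outside the precondition, e.g. on convert_conll_from_bio_to_bioes(''): A returns None, B returns ''; on convert_conll_from_bio_to_bioes('a B-X\n\n'): A returns None, B returns 'a B-X S-X\n'
import Mathlib
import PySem

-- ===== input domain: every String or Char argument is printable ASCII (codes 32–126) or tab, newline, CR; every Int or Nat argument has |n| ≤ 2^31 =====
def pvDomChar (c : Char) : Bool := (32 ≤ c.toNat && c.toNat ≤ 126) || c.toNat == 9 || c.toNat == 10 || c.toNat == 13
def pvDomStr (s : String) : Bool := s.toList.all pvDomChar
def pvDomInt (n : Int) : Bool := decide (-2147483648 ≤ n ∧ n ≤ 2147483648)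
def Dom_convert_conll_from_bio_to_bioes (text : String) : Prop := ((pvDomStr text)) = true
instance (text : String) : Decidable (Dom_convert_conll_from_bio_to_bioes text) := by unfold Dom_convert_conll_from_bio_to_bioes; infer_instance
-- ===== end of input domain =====

-- B replaces A's lookback state machine (which retro-patches new_labels[i-1]) by one forward
-- pass that finalizes each label as it is emitted, using one-token lookahead for entity ends
-- (objective: alternative, same cost).  A mutates only its own local lists, so no
-- caller-visible side effects are at stake.

-- ===== SHARED STRING HELPERS =====
-- label[:2] and label[2:]
def pvTake2 (s : String) : String := PySem.Str.slice s (some 0) (some 2)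
def pvDrop2 (s : String) : String := PySem.Str.slice s (some 2) none
-- line.strip().split(' '); sep ≠ '' so Str.split? is always some, the getD never fires
def pvSplitTokens (line : String) : List String :=
  (PySem.Str.split? (PySem.Str.strip line) " ").getD []

-- ===== PORT A =====
-- exact where the assert passes (label[:2] a BIOES prefix or label == 'O'); elsewhere
-- Python raises AssertionError (such labels are excluded by Pre_)
def remove_bio_from_label_name (label_name : String) : String :=
  if pvTake2 label_name ∈ ["B-", "I-", "E-", "S-"] then pvDrop2 label_name
  else label_name

-- Python mutates new_labels in place and returns None; the port returns the updated list
def end_current_entity (previous_label_without_bio : String) (current_entity_length : Int)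
    (new_labels : List String) (i : Int) : List String :=
  if current_entity_length = 0 then new_labels
  else if current_entity_length = 1 then
    PySem.List.pySetD new_labels (i - 1) ("S-" ++ previous_label_without_bio)
  else
    PySem.List.pySetD new_labels (i - 1) ("E-" ++ previous_label_without_bio)

-- one iteration of the 'for i, label in enumerate(labels)' loop; state (prev, len, new_labels)
def pvBioStep (st : String × Int × List String) (p : Int × String) : String × Int × List String :=
  let prev := st.1; let clen := st.2.1; let nl := st.2.2
  let i := p.1; let label := p.2
  let lwb := remove_bio_from_label_name label
  let c1 : Int × List String :=
    if clen > 0 ∧ (pvTake2 label ∈ ["B-", "O"] ∨ (pvTake2 label = "I-" ∧ prev ≠ lwb)) then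
      (0, end_current_entity prev clen nl i)
    else (clen, nl)
  let c2 : Int × List String :=
    if pvTake2 label = "B-" then (1, c1.2)
    else if pvTake2 label = "I-" then
      (c1.1 + 1, if c1.1 = 0 then PySem.List.pySetD c1.2 i ("B-" ++ lwb) else c1.2)
    else c1
  (lwb, c2)

-- after the loop Python reuses the last i, so i + 1 = len(labels) (labels ≠ [] at every
-- call site; on [] Python would raise NameError, unreachable behind the labels == [] guard)
def bio_to_bioes (labels : List String) : List String :=
  let st := (PySem.List.enumerate labels 0).foldl pvBioStep ("O", 0, labels)
  end_current_entity st.1 st.2.1 st.2.2 (labels.length : Int)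

-- Python returns None when labels == [] (the caller then raises on 'output += line' or
-- returns None from the whole function; both excluded by Pre_): the port returns output
def output_conll_lines_with_bioes (split_lines : List (List String)) (labels : List String)
    (output : String) : String :=
  if labels = [] then output
  else
    let new_labels := bio_to_bioes labels
    (split_lines.zip new_labels).foldl
      (fun out p => out ++ PySem.Str.join " " (p.1 ++ [p.2]) ++ "\n") output

-- one iteration of the line loop; 'del labels[:]' / 'del split_lines[:]' inside the helper
-- become the ([], []) resets; state (output, labels, split_lines)
def pvStepA (st : String × List String × List (List String)) (line : String) :
    String × List String × List (List String) :=
  let split_line := pvSplitTokens line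
  match split_line with
  | [] => (output_conll_lines_with_bioes st.2.2 st.2.1 st.1 ++ line, [], [])
  | t0 :: _ =>
    if PySem.Str.len t0 = 0 ∨ PySem.Str.isIn "-DOCSTART-" t0 then
      (output_conll_lines_with_bioes st.2.2 st.2.1 st.1 ++ line, [], [])
    else
      let label := (PySem.List.pyGet? split_line (-1)).getD ""
      (st.1, st.2.1 ++ [label], st.2.2 ++ [split_line])

def convert_conll_from_bio_to_bioes (text : String) : String :=
  let st := (PySem.Str.splitlines text).foldl pvStepA ("", [], [])
  output_conll_lines_with_bioes st.2.2 st.2.1 st.1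

-- ===== PORT B =====
-- Source B's _bio_to_bioes first asserts every label is O/B-/I-/E-/S- (exact under Pre_,
-- which admits only such labels; elsewhere Python raises AssertionError), then folds the
-- loop below: state (new, inside, single, prev); lookahead pairs from
-- zip(labels, labels[1:] + ['O'])
def pvAltStep (st : List String × Bool × Bool × String) (p : String × String) :
    List String × Bool × Bool × String :=
  let lab := p.1
  let t := if lab = "O" then lab else pvDrop2 lab
  let c : String × Bool × Bool :=
    if PySem.Str.startswith lab "B-" then (lab, true, true)
    else if PySem.Str.startswith lab "I-" then
      (if st.2.1 && (st.2.2.2 == t) then (lab, st.2.1, false)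
       else ("B-" ++ t, true, true))
    else (lab, st.2.1 && !(lab == "O"), st.2.2.1)
  let nxt := p.2
  let n := if nxt = "O" then nxt else pvDrop2 nxt
  let ends := c.2.1 && ((nxt == "O") || PySem.Str.startswith nxt "B-"
      || (PySem.Str.startswith nxt "I-" && !(n == t)))
  (st.1 ++ [if ends then (if c.2.2 then "S-" else "E-") ++ t else c.1], c.2.1, c.2.2, t)

def pvBioesLocal (labels : List String) : List String :=
  ((labels.zip (PySem.List.slice labels (some 1) none ++ ["O"])).foldl pvAltStep
    ([], false, false, "O")).1

def pvRenderSentence (sentence : List (List String)) : List String :=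
  let labels := sentence.map (fun toks => (PySem.List.pyGet? toks (-1)).getD "")
  let new_labels := pvBioesLocal labels
  (sentence.zip new_labels).map (fun p => PySem.Str.join " " (p.1 ++ [p.2]) ++ "\n")

-- one iteration of Source B's line loop; state (parts, sentence)
def pvStepB (st : List String × List (List String)) (line : String) :
    List String × List (List String) :=
  let tokens := pvSplitTokens line
  match tokens with
  | [] => (st.1 ++ pvRenderSentence st.2 ++ [line], [])
  | t0 :: _ =>
    if t0 = "" ∨ PySem.Str.isIn "-DOCSTART-" t0 then
      (st.1 ++ pvRenderSentence st.2 ++ [line], [])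
    else (st.1, st.2 ++ [tokens])

def convert_conll_from_bio_to_bioes_alt (text : String) : String :=
  let st := (PySem.Str.splitlines text).foldl pvStepB ([], [])
  PySem.Str.join "" (st.1 ++ pvRenderSentence st.2)

-- ===== PRECONDITION & SPEC =====
def pvIsSep (line : String) : Bool :=
  match pvSplitTokens line with
  | [] => true
  | t0 :: _ => t0 == "" || PySem.Str.isIn "-DOCSTART-" t0

def pvLineLabel (line : String) : String := ((pvSplitTokens line).getLast?).getD ""

def pvValidBIO (s : String) : Bool :=
  s == "O" || PySem.Str.startswith s "B-" || PySem.Str.startswith s "I-" ||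
    PySem.Str.startswith s "E-" || PySem.Str.startswith s "S-"

-- Pre_ excludes exactly the inputs on which A raises (a data line whose label lies
-- outside the BIO/BIOES scheme: AssertionError; a separator line arriving while no data
-- lines are pending: TypeError when A appends that line to the helper's None result) or
-- returns None instead of a string (text whose final segment has no data line, e.g. the
-- empty text).
def Pre_convert_conll_from_bio_to_bioes (text : String) : Prop :=
  let L := PySem.Str.splitlines text
  L ≠ [] ∧
  (L.head?.all (fun h => !pvIsSep h)) = true ∧
  (L.getLast?.all (fun h => !pvIsSep h)) = true ∧
  List.IsChain (fun a b => ¬(pvIsSep a = true ∧ pvIsSep b = true)) L ∧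
  (∀ l ∈ L, pvIsSep l = false → pvValidBIO (pvLineLabel l) = true)

instance (text : String) : Decidable (Pre_convert_conll_from_bio_to_bioes text) := by
  unfold Pre_convert_conll_from_bio_to_bioes; infer_instance

def pvWitness_convert_conll_from_bio_to_bioes : String := "Tim B-PER\nray O"

def Spec_convert_conll_from_bio_to_bioes (text : String) (out : String) : Prop :=
  out = convert_conll_from_bio_to_bioes_alt text
instance (text : String) (out : String) :
    Decidable (Spec_convert_conll_from_bio_to_bioes text out) := by
  unfold Spec_convert_conll_from_bio_to_bioes; infer_instance

-- ===== CLAIM (what is proved, stated in full; the proofs are below) =====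
def Claim_equal_convert_conll_from_bio_to_bioes : Prop :=
  ∀ (text : String), Dom_convert_conll_from_bio_to_bioes text →
    Pre_convert_conll_from_bio_to_bioes text →
    Spec_convert_conll_from_bio_to_bioes text (convert_conll_from_bio_to_bioes text)

-- ===== LEMMAS AND PROOFS =====

-- ---- proof-side specification: an event machine (prev type, open?, single?) ----
def pvPfxB (l : String) : Bool := PySem.Str.startswith l "B-"

def pvCandS (p : String) (lab : String) : Bool :=
  lab == "O" || pvTake2 lab == "B-" ||
    (pvTake2 lab == "I-" && !(p == (if lab = "O" then lab else pvDrop2 lab)))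

def pvBStepS (st : String × Bool × Bool) (lab : String) : String × Bool × Bool :=
  let t := if lab = "O" then lab else pvDrop2 lab
  if pvTake2 lab = "B-" then (t, true, true)
  else if pvTake2 lab = "I-" then (t, true, !st.2.1 || pvCandS st.1 lab)
  else (t, if lab = "O" then false else st.2.1, st.2.2)

def pvSt0 : String × Bool × Bool := ("O", false, false)

def pvFoldS (st : String × Bool × Bool) (ds : List String) : String × Bool × Bool :=
  ds.foldl pvBStepS st

def pvPreform (st : String × Bool × Bool) (lab : String) : String :=
  if pvTake2 lab = "B-" then lab
  else if pvTake2 lab = "I-" then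
    (if st.2.1 && !(pvCandS st.1 lab) then lab
     else "B-" ++ (if lab = "O" then lab else pvDrop2 lab))
  else lab

def pvCloseNow (st : String × Bool × Bool) (lab : String) : Bool :=
  st.2.1 && pvCandS st.1 lab

def pvEndsAt (st' : String × Bool × Bool) (nx : Option String) : Bool :=
  match nx with
  | none => st'.2.1
  | some q => pvCloseNow st' q

def pvSlotVal (st : String × Bool × Bool) (lab : String) (nx : Option String) : String :=
  let st' := pvBStepS st lab
  if pvEndsAt st' nx then
    (if st'.2.2 then "S-" else "E-") ++ (if lab = "O" then lab else pvDrop2 lab)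
  else pvPreform st lab

-- chain of pvSlotVal; the last element's successor is nx
def pvFinS (st : String × Bool × Bool) : List String → Option String → List String
  | [], _ => []
  | l :: ds, nx =>
    pvSlotVal st l (match ds with | [] => nx | d :: _ => some d) ::
      pvFinS (pvBStepS st l) ds nx

-- like pvFinS, but the last element is still "open": only its promoted form is decided
def pvPendS (st : String × Bool × Bool) : List String → List String
  | [] => []
  | [l] => [pvPreform st l]
  | l :: l2 :: ds => pvSlotVal st l (some l2) :: pvPendS (pvBStepS st l) (l2 :: ds)

-- ---- A-side (prev, len) machine ----
def pvMStep (pc : String × Int) (label : String) : String × Int :=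
  let lwb := remove_bio_from_label_name label
  let c1 : Int :=
    if pc.2 > 0 ∧ (pvTake2 label ∈ ["B-", "O"] ∨ (pvTake2 label = "I-" ∧ pc.1 ≠ lwb)) then 0
    else pc.2
  (lwb, if pvTake2 label = "B-" then 1 else if pvTake2 label = "I-" then c1 + 1 else c1)

def pvMPC (done : List String) : String × Int := done.foldl pvMStep ("O", 0)

def pvLastTok (toks : List String) : String := (PySem.List.pyGet? toks (-1)).getD ""

-- ---- canonical-form facts about valid labels ----
lemma pv_valid_cases (l : String) (h : pvValidBIO l = true) :
    l = "O" ∨ (∃ t, l.toList = 'B' :: '-' :: t) ∨ (∃ t, l.toList = 'I' :: '-' :: t) ∨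
      (∃ t, l.toList = 'E' :: '-' :: t) ∨ (∃ t, l.toList = 'S' :: '-' :: t) := by
  simp only [pvValidBIO, Bool.or_eq_true, beq_iff_eq] at h
  rcases h with ((((h | h) | h) | h) | h)
  · exact Or.inl h
  all_goals
    rw [PySem.Str.startswith_eq] at h
  · refine Or.inr (Or.inl ?_)
    obtain ⟨u, hu⟩ := (PySem.Chars.startswith_iff _ _).1 h
    exact ⟨u, by simpa using hu.symm⟩
  · refine Or.inr (Or.inr (Or.inl ?_))
    obtain ⟨u, hu⟩ := (PySem.Chars.startswith_iff _ _).1 h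
    exact ⟨u, by simpa using hu.symm⟩
  · refine Or.inr (Or.inr (Or.inr (Or.inl ?_)))
    obtain ⟨u, hu⟩ := (PySem.Chars.startswith_iff _ _).1 h
    exact ⟨u, by simpa using hu.symm⟩
  · refine Or.inr (Or.inr (Or.inr (Or.inr ?_)))
    obtain ⟨u, hu⟩ := (PySem.Chars.startswith_iff _ _).1 h
    exact ⟨u, by simpa using hu.symm⟩

lemma pv_take2_B {l : String} (t : List Char) (h : l.toList = 'B' :: '-' :: t) :
    pvTake2 l = "B-" ∧ remove_bio_from_label_name l = pvDrop2 l ∧ l ≠ "O" ∧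
    pvPfxB l = true ∧ pvTake2 l ≠ "I-" := by
  have h2 : pvTake2 l = "B-" := by
    apply String.toList_inj.mp; simp [pvTake2, pysem, h]
  refine ⟨h2, ?_, ?_, ?_, ?_⟩
  · simp [remove_bio_from_label_name, h2]
  · intro e; rw [e] at h; simp at h
  · simp [pvPfxB, pysem, h]
  · rw [h2]; decide

lemma pv_take2_I {l : String} (t : List Char) (h : l.toList = 'I' :: '-' :: t) :
    pvTake2 l = "I-" ∧ remove_bio_from_label_name l = pvDrop2 l ∧ l ≠ "O" ∧
    pvPfxB l = false ∧ pvTake2 l ≠ "B-" ∧ pvTake2 l ∉ (["B-", "O"] : List String) := by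
  have h2 : pvTake2 l = "I-" := by
    apply String.toList_inj.mp; simp [pvTake2, pysem, h]
  refine ⟨h2, ?_, ?_, ?_, ?_, ?_⟩
  · simp [remove_bio_from_label_name, h2]
  · intro e; rw [e] at h; simp at h
  · simp only [pvPfxB, PySem.Str.startswith_eq, h]
    rw [show ("B-" : String).toList = ['B', '-'] from rfl]
    rw [Bool.eq_false_iff, ne_eq, PySem.Chars.startswith_iff]
    rintro ⟨u, hu⟩; simp at hu
  · rw [h2]; decide
  · rw [h2]; decide

set_option maxHeartbeats 1000000 in
lemma pv_take2_T {l : String} (t : List Char)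
    (h : l.toList = 'E' :: '-' :: t ∨ l.toList = 'S' :: '-' :: t) :
    remove_bio_from_label_name l = pvDrop2 l ∧ l ≠ "O" ∧
    pvTake2 l ≠ "B-" ∧ pvTake2 l ≠ "I-" ∧ pvTake2 l ∉ (["B-", "O"] : List String) ∧
    (pvTake2 l == "B-") = false ∧ (pvTake2 l == "I-") = false ∧ (l == "O") = false := by
  rcases h with h | h
  · have h2 : pvTake2 l = "E-" := by
      apply String.toList_inj.mp; simp [pvTake2, pysem, h]
    have hO : l ≠ "O" := by intro e; rw [e] at h; simp at h
    refine ⟨?_, hO, ?_, ?_, ?_, ?_, ?_, ?_⟩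
    · simp [remove_bio_from_label_name, h2]
    · rw [h2]; decide
    · rw [h2]; decide
    · rw [h2]; decide
    · rw [h2]; decide
    · rw [h2]; decide
    · simp [hO]
  · have h2 : pvTake2 l = "S-" := by
      apply String.toList_inj.mp; simp [pvTake2, pysem, h]
    have hO : l ≠ "O" := by intro e; rw [e] at h; simp at h
    refine ⟨?_, hO, ?_, ?_, ?_, ?_, ?_, ?_⟩
    · simp [remove_bio_from_label_name, h2]
    · rw [h2]; decide
    · rw [h2]; decide
    · rw [h2]; decide
    · rw [h2]; decide
    · rw [h2]; decide
    · simp [hO]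

lemma pv_take2_O : pvTake2 "O" = "O" ∧ remove_bio_from_label_name "O" = "O" ∧
    pvPfxB "O" = false := by
  refine ⟨by decide, ?_, by decide⟩
  simp [remove_bio_from_label_name]; decide

-- s.startswith(p) for a two-character p is the s[:2] comparison
lemma pv_sw (q p : String) (hp : p.toList.length = 2) :
    PySem.Str.startswith q p = (pvTake2 q == p) := by
  have ht : (pvTake2 q).toList = q.toList.take 2 := by
    simp [pvTake2, pysem]
  by_cases h : pvTake2 q = p
  · have hpre : p.toList <+: q.toList := by
      have h2 := congrArg String.toList h
      rw [ht] at h2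
      rw [← h2]
      exact List.take_prefix 2 q.toList
    have hs : PySem.Chars.startswith q.toList p.toList = true :=
      (PySem.Chars.startswith_iff _ _).mpr hpre
    rw [PySem.Str.startswith_eq, hs, h]
    simp
  · have hns : ¬ (p.toList <+: q.toList) := by
      intro hpre
      apply h
      apply String.toList_inj.mp
      rw [ht]
      have h3 := List.prefix_iff_eq_take.mp hpre
      rw [hp] at h3
      exact h3.symm
    have hs : PySem.Chars.startswith q.toList p.toList = false := by
      rw [Bool.eq_false_iff, ne_eq, PySem.Chars.startswith_iff]
      exact hns
    rw [PySem.Str.startswith_eq, hs]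
    simp [h]

lemma pv_beq_comm (a b : String) : (a == b) = (b == a) := by
  by_cases h : a = b <;> simp [h]; exact Ne.symm h

-- ---- facts about the machine state ----
lemma pv_mpc_append (done : List String) (l : String) :
    pvMPC (done ++ [l]) = pvMStep (pvMPC done) l := by
  simp [pvMPC]

lemma pv_mlen_nonneg (done : List String) : 0 ≤ (pvMPC done).2 := by
  induction done using List.reverseRecOn with
  | nil => simp [pvMPC]
  | append_singleton ds d ih =>
    rw [pv_mpc_append]
    simp only [pvMStep]
    split_ifs <;> omega

lemma pv_mprev_last (done : List String) (l : String) :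
    (pvMPC (done ++ [l])).1 = remove_bio_from_label_name l := by
  rw [pv_mpc_append]; rfl

lemma pv_mstep_O (pc : String × Int) (h : 0 ≤ pc.2) : pvMStep pc "O" = ("O", 0) := by
  obtain ⟨p, c⟩ := pc
  simp only at h
  have e1 : ("O" : String) ≠ "B-" := by decide
  have e2 : ("O" : String) ≠ "I-" := by decide
  have e3 : ("O" : String) ∈ (["B-", "O"] : List String) := by decide
  simp only [pvMStep, pv_take2_O.1, pv_take2_O.2.1, e1, e2, e3, if_false, true_or,
    and_true, Prod.mk.injEq, if_neg e1, if_neg e2]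
  refine ⟨trivial, ?_⟩
  split_ifs <;> omega

lemma pv_mstep_B (pc : String × Int) {l : String} (t : List Char)
    (h : l.toList = 'B' :: '-' :: t) : pvMStep pc l = (pvDrop2 l, 1) := by
  obtain ⟨hB, hrm, -, -, hnI⟩ := pv_take2_B t h
  simp [pvMStep, hB, hrm]

lemma pv_mstep_I (pc : String × Int) {l : String} (t : List Char)
    (h : l.toList = 'I' :: '-' :: t) :
    pvMStep pc l = (pvDrop2 l, (if pc.2 > 0 ∧ pc.1 ≠ pvDrop2 l then 0 else pc.2) + 1) := by
  obtain ⟨hI, hrm, -, -, hnB, hmem⟩ := pv_take2_I t h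
  simp [pvMStep, hI, hrm, hmem, hnB]

lemma pv_mstep_T (pc : String × Int) {l : String} (t : List Char)
    (h : l.toList = 'E' :: '-' :: t ∨ l.toList = 'S' :: '-' :: t) :
    pvMStep pc l = (pvDrop2 l, pc.2) := by
  obtain ⟨hrm, -, hnB, hnI, hmem, -, -, -⟩ := pv_take2_T t h
  simp [pvMStep, hrm, hmem, hnB, hnI]

lemma pv_mlen_O (done : List String) (hv : ∀ l ∈ done, pvValidBIO l = true) :
    (pvMPC (done ++ ["O"])).2 = 0 := by
  rw [pv_mpc_append, pv_mstep_O _ (pv_mlen_nonneg done)]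

-- ---- the event machine evaluated on each label class ----
lemma pv_cand_O (p : String) : pvCandS p "O" = true := by simp [pvCandS]

lemma pv_cand_B (p : String) {l : String} (u : List Char)
    (hu : l.toList = 'B' :: '-' :: u) : pvCandS p l = true := by
  simp [pvCandS, (pv_take2_B u hu).1]

lemma pv_cand_I (p : String) {l : String} (u : List Char)
    (hu : l.toList = 'I' :: '-' :: u) : pvCandS p l = !(p == pvDrop2 l) := by
  obtain ⟨hT2, -, hlO, -, -, -⟩ := pv_take2_I u hu
  simp [pvCandS, hT2, hlO]

lemma pv_cand_T (p : String) {l : String} (u : List Char)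
    (hu : l.toList = 'E' :: '-' :: u ∨ l.toList = 'S' :: '-' :: u) :
    pvCandS p l = false := by
  obtain ⟨-, hlO, -, -, -, hb, hi, ho⟩ := pv_take2_T u hu
  simp [pvCandS, hb, hi, ho]

lemma pv_bstep_O (st : String × Bool × Bool) : pvBStepS st "O" = ("O", false, st.2.2) := by
  have e1 : pvTake2 "O" ≠ "B-" := by rw [pv_take2_O.1]; decide
  have e2 : pvTake2 "O" ≠ "I-" := by rw [pv_take2_O.1]; decide
  simp [pvBStepS, e1, e2]

lemma pv_bstep_B (st : String × Bool × Bool) {l : String} (u : List Char)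
    (hu : l.toList = 'B' :: '-' :: u) : pvBStepS st l = (pvDrop2 l, true, true) := by
  obtain ⟨hT2, -, hlO, -, -⟩ := pv_take2_B u hu
  simp [pvBStepS, hT2, hlO]

lemma pv_bstep_I (st : String × Bool × Bool) {l : String} (u : List Char)
    (hu : l.toList = 'I' :: '-' :: u) :
    pvBStepS st l = (pvDrop2 l, true, !st.2.1 || !(st.1 == pvDrop2 l)) := by
  obtain ⟨hT2, -, hlO, -, hnB, -⟩ := pv_take2_I u hu
  simp [pvBStepS, hT2, hlO, hnB, pv_cand_I st.1 u hu]

lemma pv_bstep_T (st : String × Bool × Bool) {l : String} (u : List Char)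
    (hu : l.toList = 'E' :: '-' :: u ∨ l.toList = 'S' :: '-' :: u) :
    pvBStepS st l = (pvDrop2 l, st.2.1, st.2.2) := by
  obtain ⟨-, hlO, hnB, hnI, -, -, -, -⟩ := pv_take2_T u hu
  simp [pvBStepS, hnB, hnI, hlO]

lemma pv_preform_O (st : String × Bool × Bool) : pvPreform st "O" = "O" := by
  have e1 : pvTake2 "O" ≠ "B-" := by rw [pv_take2_O.1]; decide
  have e2 : pvTake2 "O" ≠ "I-" := by rw [pv_take2_O.1]; decide
  simp [pvPreform, e1, e2]

lemma pv_preform_B (st : String × Bool × Bool) {l : String} (u : List Char)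
    (hu : l.toList = 'B' :: '-' :: u) : pvPreform st l = l := by
  simp [pvPreform, (pv_take2_B u hu).1]

lemma pv_preform_I (st : String × Bool × Bool) {l : String} (u : List Char)
    (hu : l.toList = 'I' :: '-' :: u) :
    pvPreform st l = if st.2.1 && (st.1 == pvDrop2 l) then l else "B-" ++ pvDrop2 l := by
  obtain ⟨hT2, -, hlO, -, hnB, -⟩ := pv_take2_I u hu
  simp [pvPreform, hT2, hlO, hnB, pv_cand_I st.1 u hu]

lemma pv_preform_T (st : String × Bool × Bool) {l : String} (u : List Char)
    (hu : l.toList = 'E' :: '-' :: u ∨ l.toList = 'S' :: '-' :: u) : pvPreform st l = l := by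
  obtain ⟨-, -, hnB, hnI, -, -, -, -⟩ := pv_take2_T u hu
  simp [pvPreform, hnB, hnI]

lemma pv_foldS_append (st : String × Bool × Bool) (ds : List String) (l : String) :
    pvFoldS st (ds ++ [l]) = pvBStepS (pvFoldS st ds) l := by
  simp [pvFoldS]

-- ---- the two state machines run in lock-step ----
lemma pv_sync (done : List String) (hv : ∀ x ∈ done, pvValidBIO x = true) :
    (pvFoldS pvSt0 done).1 = (pvMPC done).1 ∧
    ((pvFoldS pvSt0 done).2.1 = true ↔ 0 < (pvMPC done).2) ∧
    ((pvFoldS pvSt0 done).2.1 = true →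
      ((pvFoldS pvSt0 done).2.2 = true ↔ (pvMPC done).2 = 1)) := by
  induction done using List.reverseRecOn with
  | nil => simp [pvFoldS, pvSt0, pvMPC]
  | append_singleton ds d ih =>
    have hvds : ∀ x ∈ ds, pvValidBIO x = true := fun x hx => hv x (by simp [hx])
    obtain ⟨ihp, ihop, ihsi⟩ := ih hvds
    have hnn := pv_mlen_nonneg ds
    have hvd : pvValidBIO d = true := hv d (by simp)
    rw [pv_foldS_append, pv_mpc_append]
    rcases pv_valid_cases d hvd with hO | ⟨u, hu⟩ | ⟨u, hu⟩ | ⟨u, hu⟩ | ⟨u, hu⟩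
    · subst hO
      rw [pv_bstep_O, pv_mstep_O _ hnn]
      simp
    · rw [pv_bstep_B _ u hu, pv_mstep_B _ u hu]
      simp
    · rw [pv_bstep_I _ u hu, pv_mstep_I _ u hu]
      refine ⟨rfl, ?_, ?_⟩
      · simp only
        constructor
        · intro _
          split_ifs <;> omega
        · intro _
          trivial
      · intro _
        rw [ihp]
        by_cases hne : (pvMPC ds).1 = pvDrop2 d <;> by_cases hcp : 0 < (pvMPC ds).2
        · have hopT : (pvFoldS pvSt0 ds).2.1 = true := ihop.mpr hcp
          rw [if_neg (by rintro ⟨-, hbad⟩; exact hbad hne)]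
          simp only [hopT, hne]
          simp
          omega
        · have hopF : (pvFoldS pvSt0 ds).2.1 = false := by
            by_contra hb
            rw [Bool.not_eq_false] at hb
            exact absurd (ihop.mp hb) hcp
          rw [if_neg (by rintro ⟨hbad, -⟩; omega)]
          have h0 : (pvMPC ds).2 = 0 := by omega
          simp [hopF, h0]
        · rw [if_pos ⟨by omega, hne⟩]
          simp [hne]
        · rw [if_neg (by rintro ⟨hbad, -⟩; omega)]
          have h0 : (pvMPC ds).2 = 0 := by omega
          have hopF : (pvFoldS pvSt0 ds).2.1 = false := by
            by_contra hb
            rw [Bool.not_eq_false] at hb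
            exact absurd (ihop.mp hb) hcp
          simp [hopF, h0]
    · rw [pv_bstep_T _ u (Or.inl hu), pv_mstep_T _ u (Or.inl hu)]
      exact ⟨rfl, ihop, ihsi⟩
    · rw [pv_bstep_T _ u (Or.inr hu), pv_mstep_T _ u (Or.inr hu)]
      exact ⟨rfl, ihop, ihsi⟩

-- ---- structural lemmas about pvFinS / pvPendS ----
lemma pv_finS_length (st : String × Bool × Bool) (ds : List String) (nx : Option String) :
    (pvFinS st ds nx).length = ds.length := by
  induction ds generalizing st with
  | nil => rfl
  | cons d ds ih => simp [pvFinS, ih]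

lemma pv_pendS_length (st : String × Bool × Bool) (ds : List String) :
    (pvPendS st ds).length = ds.length := by
  induction ds generalizing st with
  | nil => rfl
  | cons d ds ih =>
    cases ds with
    | nil => rfl
    | cons e es => simpa [pvPendS] using ih (pvBStepS st d)

lemma pv_finS_append (st : String × Bool × Bool) (done : List String) (l : String)
    (nx : Option String) :
    pvFinS st (done ++ [l]) nx =
      pvFinS st done (some l) ++ [pvSlotVal (pvFoldS st done) l nx] := by
  induction done generalizing st with
  | nil => simp [pvFinS, pvFoldS]
  | cons d ds ih =>
    cases ds with
    | nil => simp [pvFinS, pvFoldS]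
    | cons e es =>
      have := ih (pvBStepS st d)
      simp only [List.cons_append, pvFinS] at this ⊢
      rw [this]
      simp [pvFoldS]

lemma pv_pendS_append (st : String × Bool × Bool) (done : List String) (l : String) :
    pvPendS st (done ++ [l]) =
      pvFinS st done (some l) ++ [pvPreform (pvFoldS st done) l] := by
  induction done generalizing st with
  | nil => simp [pvPendS, pvFinS, pvFoldS]
  | cons d ds ih =>
    cases ds with
    | nil => simp [pvPendS, pvFinS, pvFoldS]
    | cons e es =>
      have := ih (pvBStepS st d)
      simp only [List.cons_append, pvPendS, pvFinS] at this ⊢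
      rw [this]
      simp [pvFoldS]

-- when the successor does not close the prefix, the pending picture is already final
lemma pv_pendS_eq_finS (st : String × Bool × Bool) (done : List String) (nx : Option String)
    (h : pvEndsAt (pvFoldS st done) nx = false) :
    pvFinS st done nx = pvPendS st done := by
  rcases List.eq_nil_or_concat done with hnil | ⟨d0, dl, hds⟩
  · subst hnil; rfl
  · rw [List.concat_eq_append] at hds
    subst hds
    rw [pv_finS_append, pv_pendS_append]
    rw [pvSlotVal]
    rw [show pvEndsAt (pvBStepS (pvFoldS st d0) dl) nx = false by
      rw [← pv_foldS_append]; exact h]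
    simp

-- ---- stage 1: B's lookahead pass computes the pvFinS chain ----
lemma pv_ends_cand (p q : String) :
    ((q == "O") || PySem.Str.startswith q "B-"
      || (PySem.Str.startswith q "I-" && !((if q = "O" then q else pvDrop2 q) == p)))
    = pvCandS p q := by
  rw [pv_sw q "B-" rfl, pv_sw q "I-" rfl, pvCandS,
    pv_beq_comm (if q = "O" then q else pvDrop2 q) p]

lemma pv_alt_step (acc : List String) (st : String × Bool × Bool) (lab q : String)
    (hv : pvValidBIO lab = true) :
    pvAltStep (acc, st.2.1, st.2.2, st.1) (lab, q)
      = (acc ++ [pvSlotVal st lab (some q)],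
         (pvBStepS st lab).2.1, (pvBStepS st lab).2.2, (pvBStepS st lab).1) := by
  rcases pv_valid_cases lab hv with hO | ⟨u, hu⟩ | ⟨u, hu⟩ | ⟨u, hu⟩ | ⟨u, hu⟩
  · -- lab = "O"
    subst hO
    have hb : PySem.Str.startswith "O" "B-" = false := by decide
    have hi : PySem.Str.startswith "O" "I-" = false := by decide
    simp only [pvAltStep, pv_bstep_O, pvSlotVal, pvEndsAt, pvCloseNow, hb, hi,
      if_pos rfl, Bool.false_and, pv_preform_O]
    simp
  · -- lab is B-prefixed
    obtain ⟨hT2, -, hlO, hpf, -⟩ := pv_take2_B u hu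
    have hb : PySem.Str.startswith lab "B-" = true := hpf
    simp only [pvAltStep, pv_bstep_B _ u hu, pvSlotVal, pvEndsAt, pvCloseNow, hb,
      if_neg hlO, if_true, pv_preform_B _ u hu, Bool.true_and]
    rw [pv_ends_cand (pvDrop2 lab) q]
  · -- lab is I-prefixed
    obtain ⟨hT2, -, hlO, hpfB, -, -⟩ := pv_take2_I u hu
    have hb : PySem.Str.startswith lab "B-" = false := hpfB
    have hi : PySem.Str.startswith lab "I-" = true := by
      rw [pv_sw lab "I-" rfl, hT2]; decide
    simp only [pvAltStep, pv_bstep_I _ u hu, pvSlotVal, pvEndsAt, pvCloseNow, hb, hi,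
      Bool.false_eq_true, if_false, if_neg hlO, if_true, pv_preform_I _ u hu,
      Bool.true_and]
    rw [pv_ends_cand (pvDrop2 lab) q]
    cases hc : (st.2.1 && (st.1 == pvDrop2 lab)) with
    | true =>
      obtain ⟨h1, h2⟩ := Bool.and_eq_true_iff.mp hc
      simp [h1, h2]
    | false =>
      have hsi : (!st.2.1 || !(st.1 == pvDrop2 lab)) = true := by
        rw [← Bool.not_and, hc]; rfl
      simp [hsi, hc]
  · -- lab is E-prefixed
    obtain ⟨-, hlO, -, -, -, hbB, hbI, -⟩ := pv_take2_T u (Or.inl hu)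
    have hb : PySem.Str.startswith lab "B-" = false := by rw [pv_sw lab "B-" rfl]; exact hbB
    have hi : PySem.Str.startswith lab "I-" = false := by rw [pv_sw lab "I-" rfl]; exact hbI
    have hO' : (lab == "O") = false := by simp [hlO]
    simp only [pvAltStep, pv_bstep_T _ u (Or.inl hu), pvSlotVal, pvEndsAt, pvCloseNow,
      hb, hi, Bool.false_eq_true, if_false, if_neg hlO, hO', Bool.not_false,
      Bool.and_true, pv_preform_T _ u (Or.inl hu)]
    rw [pv_ends_cand (pvDrop2 lab) q]
  · -- lab is S-prefixed
    obtain ⟨-, hlO, -, -, -, hbB, hbI, -⟩ := pv_take2_T u (Or.inr hu)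
    have hb : PySem.Str.startswith lab "B-" = false := by rw [pv_sw lab "B-" rfl]; exact hbB
    have hi : PySem.Str.startswith lab "I-" = false := by rw [pv_sw lab "I-" rfl]; exact hbI
    have hO' : (lab == "O") = false := by simp [hlO]
    simp only [pvAltStep, pv_bstep_T _ u (Or.inr hu), pvSlotVal, pvEndsAt, pvCloseNow,
      hb, hi, Bool.false_eq_true, if_false, if_neg hlO, hO', Bool.not_false,
      Bool.and_true, pv_preform_T _ u (Or.inr hu)]
    rw [pv_ends_cand (pvDrop2 lab) q]

-- the padding 'O' closes exactly like the end of the list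
lemma pv_slot_sentinel (st : String × Bool × Bool) (lab : String) :
    pvSlotVal st lab (some "O") = pvSlotVal st lab none := by
  simp [pvSlotVal, pvEndsAt, pvCloseNow, pv_cand_O]

lemma pv_alt_chain (ds : List String) :
    ∀ (st : String × Bool × Bool) (acc : List String),
    (∀ x ∈ ds, pvValidBIO x = true) →
    ((ds.zip (ds.drop 1 ++ ["O"])).foldl pvAltStep (acc, st.2.1, st.2.2, st.1)).1
      = acc ++ pvFinS st ds none := by
  induction ds with
  | nil => intro st acc _; simp [pvFinS]
  | cons l t ih =>
    intro st acc hv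
    have hl := hv l (by simp)
    cases t with
    | nil =>
      rw [show ([l].drop 1 ++ ["O"]) = ["O"] from rfl]
      rw [show List.zip [l] ["O"] = [(l, "O")] from rfl]
      rw [List.foldl_cons, List.foldl_nil, pv_alt_step acc st l "O" hl, pv_slot_sentinel]
      rw [show pvFinS st [l] none = [pvSlotVal st l none] from rfl]
    | cons q t' =>
      rw [show ((l :: q :: t').drop 1 ++ ["O"]) = q :: (t' ++ ["O"]) from rfl]
      rw [show List.zip (l :: q :: t') (q :: (t' ++ ["O"]))
          = (l, q) :: List.zip (q :: t') (t' ++ ["O"]) from rfl]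
      rw [List.foldl_cons, pv_alt_step acc st l q hl]
      have hrec := ih (pvBStepS st l) (acc ++ [pvSlotVal st l (some q)])
        (fun x hx => hv x (List.mem_cons_of_mem _ hx))
      rw [show ((q :: t').drop 1 ++ ["O"]) = t' ++ ["O"] from rfl] at hrec
      rw [hrec, List.append_assoc]
      rw [show pvFinS st (l :: q :: t') none
          = pvSlotVal st l (some q) :: pvFinS (pvBStepS st l) (q :: t') none from rfl]
      rfl

lemma pv_stage1 (labels : List String) (hv : ∀ x ∈ labels, pvValidBIO x = true) :
    pvBioesLocal labels = pvFinS pvSt0 labels none := by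
  rw [pvBioesLocal, PySem.List.slice_from_one, ← List.drop_one]
  have h := pv_alt_chain labels pvSt0 [] hv
  simpa [pvSt0] using h
lemma pv_biostep_O (p : String) (c : Int) (nl : List String) (i : Int) :
    pvBioStep (p, c, nl) (i, "O")
      = ("O", if 0 < c then 0 else c,
          if 0 < c then end_current_entity p c nl i else nl) := by
  have hm : pvTake2 "O" ∈ (["B-", "O"] : List String) := by rw [pv_take2_O.1]; decide
  have h1 : pvTake2 "O" ≠ "B-" := by rw [pv_take2_O.1]; decide
  have h2 : pvTake2 "O" ≠ "I-" := by rw [pv_take2_O.1]; decide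
  simp only [pvBioStep, pv_take2_O.2.1, hm, true_or, and_true, gt_iff_lt,
    if_neg h1, if_neg h2]
  by_cases hpos : 0 < c
  · rw [if_pos hpos, if_pos hpos, if_pos hpos]
  · rw [if_neg hpos, if_neg hpos, if_neg hpos]

lemma pv_biostep_B (p : String) (c : Int) (nl : List String) (i : Int) {l : String}
    (u : List Char) (hu : l.toList = 'B' :: '-' :: u) :
    pvBioStep (p, c, nl) (i, l)
      = (pvDrop2 l, 1, if 0 < c then end_current_entity p c nl i else nl) := by
  obtain ⟨hT2, hrm, -, -, -⟩ := pv_take2_B u hu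
  have hm : pvTake2 l ∈ (["B-", "O"] : List String) := by rw [hT2]; decide
  simp only [pvBioStep, hrm, hm, true_or, and_true, gt_iff_lt, if_pos hT2]
  by_cases hpos : 0 < c
  · rw [if_pos hpos, if_pos hpos]
  · rw [if_neg hpos, if_neg hpos]

lemma pv_biostep_I (p : String) (c : Int) (nl : List String) (i : Int) {l : String}
    (u : List Char) (hu : l.toList = 'I' :: '-' :: u) :
    pvBioStep (p, c, nl) (i, l)
      = (pvDrop2 l,
         (if 0 < c ∧ p ≠ pvDrop2 l then 0 else c) + 1,
         if (if 0 < c ∧ p ≠ pvDrop2 l then (0 : Int) else c) = 0 then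
           PySem.List.pySetD
             (if 0 < c ∧ p ≠ pvDrop2 l then end_current_entity p c nl i else nl) i
             ("B-" ++ pvDrop2 l)
         else (if 0 < c ∧ p ≠ pvDrop2 l then end_current_entity p c nl i else nl)) := by
  obtain ⟨hT2, hrm, -, -, -, -⟩ := pv_take2_I u hu
  have e1 : ¬(("I-" : String) = "B-") := by decide
  have e3 : ¬(("I-" : String) ∈ (["B-", "O"] : List String)) := by decide
  simp only [pvBioStep, hrm, hT2, if_neg e1, if_pos (rfl : ("I-" : String) = "I-"),
    e3, false_or, true_and, eq_self_iff_true, gt_iff_lt]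
  by_cases htrig : 0 < c ∧ p ≠ pvDrop2 l
  · simp only [if_pos htrig]
    simp
  · simp only [if_neg htrig]
    simp

-- ---- stage 2: A's loop body preserves the pending-picture invariant ----
lemma pv_biostep_T (p : String) (c : Int) (nl : List String) (i : Int) {l : String}
    (u : List Char) (hu : l.toList = 'E' :: '-' :: u ∨ l.toList = 'S' :: '-' :: u) :
    pvBioStep (p, c, nl) (i, l) = (pvDrop2 l, c, nl) := by
  obtain ⟨hrm, -, hnB, hnI, hmem, -, -, -⟩ := pv_take2_T u hu
  simp [pvBioStep, hrm, hmem, hnB, hnI]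

lemma pv_step_core (done : List String) (l : String) (t : List String)
    (hv : ∀ x ∈ done ++ [l], pvValidBIO x = true) :
    pvBioStep ((pvMPC done).1, (pvMPC done).2, pvPendS pvSt0 done ++ l :: t)
        ((done.length : Int), l) =
      ((pvMPC (done ++ [l])).1, (pvMPC (done ++ [l])).2, pvPendS pvSt0 (done ++ [l]) ++ t) := by
  have hvl : pvValidBIO l = true := hv l (by simp)
  have hvdone : ∀ x ∈ done, pvValidBIO x = true := fun x hx => hv x (by simp [hx])
  have hnn := pv_mlen_nonneg done
  obtain ⟨hsp, hsop, hssi⟩ := pv_sync done hvdone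
  by_cases hop : (pvFoldS pvSt0 done).2.1 = true
  · -- an entity is open
    have hcpos : 0 < (pvMPC done).2 := hsop.mp hop
    have hc : ¬((pvMPC done).2 = 0) := by omega
    have hlne : done ≠ [] := by rintro rfl; simp [pvFoldS, pvSt0] at hop
    obtain ⟨d0, dl, hds⟩ := (List.eq_nil_or_concat done).resolve_left hlne
    rw [List.concat_eq_append] at hds
    subst hds
    have hvdl : pvValidBIO dl = true := hvdone dl (by simp)
    have hfoldd : pvBStepS (pvFoldS pvSt0 d0) dl = pvFoldS pvSt0 (d0 ++ [dl]) :=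
      (pv_foldS_append _ _ _).symm
    have hprev : (pvMPC (d0 ++ [dl])).1 = remove_bio_from_label_name dl := pv_mprev_last d0 dl
    have hdl : remove_bio_from_label_name dl = pvDrop2 dl ∧ dl ≠ "O" := by
      rcases pv_valid_cases dl hvdl with hO | ⟨w, hw⟩ | ⟨w, hw⟩ | ⟨w, hw⟩ | ⟨w, hw⟩
      · exfalso; subst hO; rw [← hfoldd, pv_bstep_O] at hop; simp at hop
      · exact ⟨(pv_take2_B w hw).2.1, (pv_take2_B w hw).2.2.1⟩
      · exact ⟨(pv_take2_I w hw).2.1, (pv_take2_I w hw).2.2.1⟩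
      · exact ⟨(pv_take2_T w (Or.inl hw)).1, (pv_take2_T w (Or.inl hw)).2.1⟩
      · exact ⟨(pv_take2_T w (Or.inr hw)).1, (pv_take2_T w (Or.inr hw)).2.1⟩
    have hidx : ((((d0 ++ [dl]).length : Nat) : Int) - 1) = ((d0.length : Nat) : Int) := by
      simp only [List.length_append, List.length_cons, List.length_nil]
      push_cast
      omega
    have hset : ∀ (v : String),
        PySem.List.pySetD (pvPendS pvSt0 (d0 ++ [dl]) ++ l :: t)
            ((((d0 ++ [dl]).length : Nat) : Int) - 1) v
          = (pvFinS pvSt0 d0 (some dl) ++ [v]) ++ l :: t := by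
      intro v
      rw [hidx, PySem.List.pySetD_natCast, pv_pendS_append, List.set_append,
        if_pos (by simp [pv_finS_length, pv_pendS_length]), List.set_append,
        if_neg (by rw [pv_finS_length]; omega), pv_finS_length, Nat.sub_self,
        List.set_cons_zero]
    have hval : ∀ (nx : Option String),
        pvEndsAt (pvFoldS pvSt0 (d0 ++ [dl])) nx = true →
        end_current_entity (pvMPC (d0 ++ [dl])).1 (pvMPC (d0 ++ [dl])).2
            (pvPendS pvSt0 (d0 ++ [dl]) ++ l :: t) ((((d0 ++ [dl]).length : Nat) : Int))
          = (pvFinS pvSt0 d0 (some dl) ++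
              [pvSlotVal (pvFoldS pvSt0 d0) dl nx]) ++ l :: t := by
      intro nx hEnds
      have hnb : pvSlotVal (pvFoldS pvSt0 d0) dl nx =
          (if (pvFoldS pvSt0 (d0 ++ [dl])).2.2 then "S-" else "E-") ++ pvDrop2 dl := by
        simp only [pvSlotVal, hfoldd, hEnds, if_true]
        simp [hdl.2]
      rw [end_current_entity, if_neg hc]
      by_cases h1 : (pvMPC (d0 ++ [dl])).2 = 1
      · rw [if_pos h1, hset, hprev, hdl.1, hnb, if_pos ((hssi hop).mpr h1)]
      · rw [if_neg h1, hset, hprev, hdl.1, hnb,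
          if_neg (fun hs => h1 ((hssi hop).mp hs))]
    rcases pv_valid_cases l hvl with hO | ⟨u, hu⟩ | ⟨u, hu⟩ | ⟨u, hu⟩ | ⟨u, hu⟩
    · subst hO
      rw [pv_biostep_O, if_pos hcpos, if_pos hcpos]
      rw [hval (some "O") (by simp [pvEndsAt, pvCloseNow, pv_cand_O, hop])]
      rw [pv_mprev_last, pv_mlen_O _ hvdone, pv_take2_O.2.1]
      rw [pv_pendS_append pvSt0 (d0 ++ [dl]) "O", pv_finS_append pvSt0 d0 dl (some "O"),
        pv_preform_O]
      simp
    · rw [pv_biostep_B _ _ _ _ u hu, if_pos hcpos]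
      rw [hval (some l) (by simp [pvEndsAt, pvCloseNow, pv_cand_B _ u hu, hop])]
      rw [pv_mprev_last, pv_mpc_append (d0 ++ [dl]) l, pv_mstep_B _ u hu,
        (pv_take2_B u hu).2.1]
      rw [pv_pendS_append pvSt0 (d0 ++ [dl]) l, pv_finS_append pvSt0 d0 dl (some l),
        pv_preform_B _ u hu]
      simp
    · by_cases heq : (pvMPC (d0 ++ [dl])).1 = pvDrop2 l
      · -- same-type continuation: nothing is patched
        have htrig : ¬((pvMPC (d0 ++ [dl])).2 > 0 ∧ (pvMPC (d0 ++ [dl])).1 ≠ pvDrop2 l) := by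
          rintro ⟨-, hbad⟩; exact hbad heq
        rw [pv_biostep_I _ _ _ _ u hu]
        simp only [if_neg htrig, if_neg hc]
        have hR : pvMPC (d0 ++ [dl] ++ [l]) = (pvDrop2 l, (pvMPC (d0 ++ [dl])).2 + 1) := by
          rw [pv_mpc_append, pv_mstep_I _ u hu, if_neg htrig]
        rw [hR, pv_pendS_append pvSt0 (d0 ++ [dl]) l, pv_preform_I _ u hu]
        rw [show ((pvFoldS pvSt0 (d0 ++ [dl])).2.1 &&
            ((pvFoldS pvSt0 (d0 ++ [dl])).1 == pvDrop2 l)) = true by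
          simp [hop, hsp, heq]]
        rw [if_pos rfl]
        rw [pv_pendS_eq_finS _ _ _ (by
          simp [pvEndsAt, pvCloseNow, pv_cand_I _ u hu, hsp, heq])]
        simp
      · -- type switch: dl is closed and l is promoted to B-
        have htrig : (pvMPC (d0 ++ [dl])).2 > 0 ∧ (pvMPC (d0 ++ [dl])).1 ≠ pvDrop2 l :=
          ⟨hcpos, heq⟩
        rw [pv_biostep_I _ _ _ _ u hu]
        simp only [if_pos htrig, if_true, eq_self_iff_true]
        rw [hval (some l) (by
          simp only [pvEndsAt, pvCloseNow, pv_cand_I _ u hu, hop, Bool.true_and]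
          rw [hsp]
          simp [htrig.2])]
        have hsetv : PySem.List.pySetD
            ((pvFinS pvSt0 d0 (some dl) ++
              [pvSlotVal (pvFoldS pvSt0 d0) dl (some l)]) ++ l :: t)
            (((d0 ++ [dl]).length : Nat) : Int) ("B-" ++ pvDrop2 l)
            = (pvFinS pvSt0 d0 (some dl) ++
                [pvSlotVal (pvFoldS pvSt0 d0) dl (some l)]) ++
              ("B-" ++ pvDrop2 l) :: t := by
          rw [PySem.List.pySetD_natCast, List.set_append,
            if_neg (by simp [pv_finS_length]),
            show ((d0 ++ [dl]).length -
              (pvFinS pvSt0 d0 (some dl) ++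
                [pvSlotVal (pvFoldS pvSt0 d0) dl (some l)]).length) = 0 by
              simp [pv_finS_length],
            List.set_cons_zero]
        rw [hsetv]
        have hR : pvMPC (d0 ++ [dl] ++ [l]) = (pvDrop2 l, 1) := by
          rw [pv_mpc_append, pv_mstep_I _ u hu, if_pos htrig]
          norm_num
        rw [hR, pv_pendS_append pvSt0 (d0 ++ [dl]) l, pv_finS_append pvSt0 d0 dl (some l),
          pv_preform_I _ u hu]
        rw [show ((pvFoldS pvSt0 (d0 ++ [dl])).2.1 &&
            ((pvFoldS pvSt0 (d0 ++ [dl])).1 == pvDrop2 l)) = false by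
          rw [hsp]
          simp [htrig.2]]
        rw [if_neg (by decide)]
        simp
    · rw [pv_biostep_T _ _ _ _ u (Or.inl hu)]
      rw [pv_mpc_append (d0 ++ [dl]) l, pv_mstep_T _ u (Or.inl hu)]
      rw [pv_pendS_append pvSt0 (d0 ++ [dl]) l, pv_preform_T _ u (Or.inl hu)]
      rw [pv_pendS_eq_finS pvSt0 (d0 ++ [dl]) (some l)
        (by simp [pvEndsAt, pvCloseNow, pv_cand_T _ u (Or.inl hu)])]
      simp
    · rw [pv_biostep_T _ _ _ _ u (Or.inr hu)]
      rw [pv_mpc_append (d0 ++ [dl]) l, pv_mstep_T _ u (Or.inr hu)]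
      rw [pv_pendS_append pvSt0 (d0 ++ [dl]) l, pv_preform_T _ u (Or.inr hu)]
      rw [pv_pendS_eq_finS pvSt0 (d0 ++ [dl]) (some l)
        (by simp [pvEndsAt, pvCloseNow, pv_cand_T _ u (Or.inr hu)])]
      simp
  · -- no entity is open
    have hopf : (pvFoldS pvSt0 done).2.1 = false := by simpa using hop
    have hc0 : (pvMPC done).2 = 0 := by
      by_contra h
      exact hop (hsop.mpr (by omega))
    have hc' : ¬(0 < (pvMPC done).2) := by omega
    have hpend : ∀ nx, pvEndsAt (pvFoldS pvSt0 done) nx = false := by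
      intro nx
      cases nx with
      | none => exact hopf
      | some q => simp [pvEndsAt, pvCloseNow, hopf]
    have hpf : ∀ nx, pvFinS pvSt0 done nx = pvPendS pvSt0 done :=
      fun nx => pv_pendS_eq_finS _ _ _ (hpend nx)
    rcases pv_valid_cases l hvl with hO | ⟨u, hu⟩ | ⟨u, hu⟩ | ⟨u, hu⟩ | ⟨u, hu⟩
    · subst hO
      rw [pv_biostep_O, if_neg hc', if_neg hc']
      rw [pv_mprev_last, pv_mlen_O done hvdone, pv_take2_O.2.1, hc0]
      rw [pv_pendS_append, pv_preform_O, hpf (some "O")]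
      simp
    · rw [pv_biostep_B _ _ _ _ u hu, if_neg hc']
      rw [pv_mprev_last, pv_mpc_append, pv_mstep_B _ u hu, (pv_take2_B u hu).2.1]
      rw [pv_pendS_append, pv_preform_B _ u hu, hpf (some l)]
      simp
    · have htrig0 : ¬((pvMPC done).2 > 0 ∧ (pvMPC done).1 ≠ pvDrop2 l) :=
        fun hbad => hc' hbad.1
      rw [pv_biostep_I _ _ _ _ u hu]
      simp only [if_neg htrig0]
      simp only [hc0]
      simp only [if_true, eq_self_iff_true]
      have hsetv : PySem.List.pySetD (pvPendS pvSt0 done ++ l :: t) ((done.length : Int))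
          ("B-" ++ pvDrop2 l) = pvPendS pvSt0 done ++ ("B-" ++ pvDrop2 l) :: t := by
        rw [PySem.List.pySetD_natCast, List.set_append,
          if_neg (by rw [pv_pendS_length]; omega), pv_pendS_length, Nat.sub_self,
          List.set_cons_zero]
      rw [hsetv]
      have hR : pvMPC (done ++ [l]) = (pvDrop2 l, 1) := by
        rw [pv_mpc_append, pv_mstep_I _ u hu, if_neg htrig0]
        rw [hc0]
        norm_num
      rw [hR, pv_pendS_append, pv_preform_I _ u hu]
      rw [show ((pvFoldS pvSt0 done).2.1 && ((pvFoldS pvSt0 done).1 == pvDrop2 l)) = false by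
        simp [hopf]]
      rw [if_neg (by decide), hpf (some l)]
      simp
    · rw [pv_biostep_T _ _ _ _ u (Or.inl hu)]
      rw [pv_mpc_append, pv_mstep_T _ u (Or.inl hu)]
      rw [pv_pendS_append, pv_preform_T _ u (Or.inl hu), hpf (some l)]
      simp
    · rw [pv_biostep_T _ _ _ _ u (Or.inr hu)]
      rw [pv_mpc_append, pv_mstep_T _ u (Or.inr hu)]
      rw [pv_pendS_append, pv_preform_T _ u (Or.inr hu), hpf (some l)]
      simp

lemma pv_stage2 (rest done : List String)
    (hv : ∀ x ∈ done ++ rest, pvValidBIO x = true) :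
    List.foldl pvBioStep ((pvMPC done).1, (pvMPC done).2, pvPendS pvSt0 done ++ rest)
        (PySem.List.enumerate rest (done.length : Int)) =
      ((pvMPC (done ++ rest)).1, (pvMPC (done ++ rest)).2, pvPendS pvSt0 (done ++ rest)) := by
  induction rest generalizing done with
  | nil => simp
  | cons l t ih =>
    rw [PySem.List.enumerate_cons, List.foldl_cons]
    rw [pv_step_core done l t (fun x hx => hv x (by
      simp only [List.mem_append, List.mem_cons, List.not_mem_nil, or_false] at hx ⊢
      tauto))]
    have harg : (done.length : Int) + 1 = (((done ++ [l]).length : Nat) : Int) := by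
      simp only [List.length_append, List.length_cons, List.length_nil]
      push_cast
      omega
    rw [harg]
    have := ih (done ++ [l]) (by
      intro x hx
      apply hv
      simp only [List.append_assoc, List.singleton_append] at hx
      exact hx)
    rw [this, List.append_assoc]
    simp

lemma pv_final (labels : List String) (hv : ∀ x ∈ labels, pvValidBIO x = true) :
    end_current_entity (pvMPC labels).1 (pvMPC labels).2 (pvPendS pvSt0 labels)
        (labels.length : Int) = pvFinS pvSt0 labels none := by
  have hnn := pv_mlen_nonneg labels
  obtain ⟨hsp, hsop, hssi⟩ := pv_sync labels hv
  by_cases hop : (pvFoldS pvSt0 labels).2.1 = true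
  · have hcpos : 0 < (pvMPC labels).2 := hsop.mp hop
    have hc : ¬((pvMPC labels).2 = 0) := by omega
    have hlne : labels ≠ [] := by rintro rfl; simp [pvFoldS, pvSt0] at hop
    obtain ⟨d0, dl, hds⟩ := (List.eq_nil_or_concat labels).resolve_left hlne
    rw [List.concat_eq_append] at hds
    subst hds
    have hvdl : pvValidBIO dl = true := hv dl (by simp)
    have hfoldd : pvBStepS (pvFoldS pvSt0 d0) dl = pvFoldS pvSt0 (d0 ++ [dl]) :=
      (pv_foldS_append _ _ _).symm
    have hprev : (pvMPC (d0 ++ [dl])).1 = remove_bio_from_label_name dl := pv_mprev_last d0 dl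
    have hdl : remove_bio_from_label_name dl = pvDrop2 dl ∧ dl ≠ "O" := by
      rcases pv_valid_cases dl hvdl with hO | ⟨w, hw⟩ | ⟨w, hw⟩ | ⟨w, hw⟩ | ⟨w, hw⟩
      · exfalso; subst hO; rw [← hfoldd, pv_bstep_O] at hop; simp at hop
      · exact ⟨(pv_take2_B w hw).2.1, (pv_take2_B w hw).2.2.1⟩
      · exact ⟨(pv_take2_I w hw).2.1, (pv_take2_I w hw).2.2.1⟩
      · exact ⟨(pv_take2_T w (Or.inl hw)).1, (pv_take2_T w (Or.inl hw)).2.1⟩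
      · exact ⟨(pv_take2_T w (Or.inr hw)).1, (pv_take2_T w (Or.inr hw)).2.1⟩
    have hidx : ((((d0 ++ [dl]).length : Nat) : Int) - 1) = ((d0.length : Nat) : Int) := by
      simp only [List.length_append, List.length_cons, List.length_nil]
      push_cast
      omega
    have hset : ∀ (v : String),
        PySem.List.pySetD (pvPendS pvSt0 (d0 ++ [dl]))
            ((((d0 ++ [dl]).length : Nat) : Int) - 1) v
          = pvFinS pvSt0 d0 (some dl) ++ [v] := by
      intro v
      rw [hidx, PySem.List.pySetD_natCast, pv_pendS_append, List.set_append,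
        if_neg (by rw [pv_finS_length]; omega), pv_finS_length, Nat.sub_self,
        List.set_cons_zero]
    have hnb : pvSlotVal (pvFoldS pvSt0 d0) dl none =
        (if (pvFoldS pvSt0 (d0 ++ [dl])).2.2 then "S-" else "E-") ++ pvDrop2 dl := by
      simp only [pvSlotVal, hfoldd, pvEndsAt, hop, if_true]
      simp [hdl.2]
    rw [pv_finS_append]
    rw [end_current_entity, if_neg hc]
    by_cases h1 : (pvMPC (d0 ++ [dl])).2 = 1
    · rw [if_pos h1, hset, hprev, hdl.1, hnb, if_pos ((hssi hop).mpr h1)]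
    · rw [if_neg h1, hset, hprev, hdl.1, hnb, if_neg (fun hs => h1 ((hssi hop).mp hs))]
  · have hopf : (pvFoldS pvSt0 labels).2.1 = false := by simpa using hop
    have hc0 : (pvMPC labels).2 = 0 := by
      by_contra h
      exact hop (hsop.mpr (by omega))
    rw [end_current_entity, if_pos hc0]
    exact (pv_pendS_eq_finS _ _ none hopf).symm

lemma pv_core (labels : List String) (hv : ∀ x ∈ labels, pvValidBIO x = true) :
    bio_to_bioes labels = pvBioesLocal labels := by
  have h2 := pv_stage2 labels [] (by simpa using hv)
  have h1 := pv_stage1 labels hv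
  have hf := pv_final labels hv
  simp only [List.nil_append, List.length_nil, Nat.cast_zero] at h2
  simp only [bio_to_bioes]
  simp only [pvMPC, List.foldl_nil] at h2
  rw [show (pvPendS pvSt0 [] ++ labels) = labels by simp [pvPendS]] at h2
  rw [h2]
  rw [show pvMPC labels = List.foldl pvMStep ("O", 0) labels from rfl] at hf
  rw [hf, h1]

lemma pv_chars_join_append (A B : List (List Char)) :
    PySem.Chars.join [] (A ++ B) = PySem.Chars.join [] A ++ PySem.Chars.join [] B := by
  induction A with
  | nil => simp [PySem.Chars.join_nil]
  | cons a A ih =>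
    cases A with
    | nil =>
      cases B with
      | nil => simp [PySem.Chars.join_nil, PySem.Chars.join_singleton]
      | cons b B' =>
        rw [show ([a] ++ (b :: B')) = a :: b :: B' by simp,
          PySem.Chars.join_cons_cons, PySem.Chars.join_singleton]
        simp
    | cons a2 A' =>
      rw [show ((a :: a2 :: A') ++ B) = a :: ((a2 :: A') ++ B) by simp]
      cases h : (a2 :: A') ++ B with
      | nil => simp at h
      | cons z zs =>
        rw [PySem.Chars.join_cons_cons, ← h, ih, PySem.Chars.join_cons_cons]
        simp

-- ---- string/join utilities ----
lemma pv_join_append (xs ys : List String) :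
    PySem.Str.join "" (xs ++ ys) = PySem.Str.join "" xs ++ PySem.Str.join "" ys := by
  apply String.toList_inj.mp
  simp only [PySem.Str.toList_join, String.toList_append, List.map_append]
  rw [show ("" : String).toList = [] from rfl]
  exact pv_chars_join_append _ _

lemma pv_join_single (x : String) : PySem.Str.join "" [x] = x := by
  apply String.toList_inj.mp
  simp [PySem.Str.toList_join, PySem.Chars.join_singleton]

lemma pv_join_nil : PySem.Str.join "" [] = "" := by
  apply String.toList_inj.mp
  simp [PySem.Str.toList_join, PySem.Chars.join_nil]

lemma pv_foldjoin {α : Type} (xs : List α) (f : α → String) (out : String) :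
    xs.foldl (fun o x => o ++ f x) out = out ++ PySem.Str.join "" (xs.map f) := by
  induction xs generalizing out with
  | nil => simp [pv_join_nil]
  | cons x xs ih =>
    rw [List.foldl_cons, ih]
    rw [show (x :: xs).map f = [f x] ++ xs.map f by simp]
    rw [pv_join_append, pv_join_single]
    apply String.toList_inj.mp
    simp [String.toList_append]

lemma pv_len_zero_iff (s : String) : PySem.Str.len s = 0 ↔ s = "" := by
  constructor
  · intro h
    apply String.toList_inj.mp
    rw [PySem.Str.len_eq] at h
    have : s.toList = [] := List.length_eq_zero_iff.mp (by exact_mod_cast h)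
    simp [this]
  · rintro rfl; rfl

lemma pv_lineLabel_eq (line : String) :
    pvLineLabel line = pvLastTok (pvSplitTokens line) := by
  simp [pvLineLabel, pvLastTok, PySem.List.pyGet?_neg_one]

-- ---- flush: A's helper output equals B's rendered parts ----
lemma pv_flush (sent : List (List String)) (out : String) (hs : sent ≠ [])
    (hv : ∀ toks ∈ sent, pvValidBIO (pvLastTok toks) = true) :
    output_conll_lines_with_bioes sent (sent.map pvLastTok) out =
      out ++ PySem.Str.join "" (pvRenderSentence sent) := by
  rw [output_conll_lines_with_bioes, if_neg (by simp [hs])]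
  have hv' : ∀ x ∈ sent.map pvLastTok, pvValidBIO x = true := by
    intro x hx
    obtain ⟨toks, htoks, rfl⟩ := List.mem_map.mp hx
    exact hv toks htoks
  rw [pv_core _ hv']
  have hfn : (fun (out : String) (p : List String × String) =>
      out ++ PySem.Str.join " " (p.1 ++ [p.2]) ++ "\n") =
      (fun (out : String) (p : List String × String) =>
      out ++ (PySem.Str.join " " (p.1 ++ [p.2]) ++ "\n")) := by
    funext o p
    apply String.toList_inj.mp
    simp [String.toList_append]
  rw [hfn, pv_foldjoin]
  rw [pvRenderSentence]
  rfl

-- ---- the two line-loop bodies, evaluated on separator and on data lines ----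
lemma pv_stepA_sep (line out : String) (sent : List (List String))
    (hsep : pvIsSep line = true) (hs : sent ≠ [])
    (hv : ∀ toks ∈ sent, pvValidBIO (pvLastTok toks) = true) :
    pvStepA (out, sent.map pvLastTok, sent) line
      = (out ++ PySem.Str.join "" (pvRenderSentence sent) ++ line, [], []) := by
  unfold pvStepA
  cases htoks : pvSplitTokens line with
  | nil =>
    simp only [htoks]
    rw [pv_flush sent out hs hv]
  | cons t0 ts =>
    simp only [htoks]
    simp only [pvIsSep, htoks, Bool.or_eq_true, beq_iff_eq] at hsep
    rw [if_pos (by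
      rcases hsep with h | h
      · exact Or.inl ((pv_len_zero_iff t0).mpr h)
      · exact Or.inr h)]
    rw [pv_flush sent out hs hv]

lemma pv_stepA_tok (line out : String) (sent : List (List String))
    (hsep : pvIsSep line = false) :
    pvStepA (out, sent.map pvLastTok, sent) line
      = (out, (sent ++ [pvSplitTokens line]).map pvLastTok, sent ++ [pvSplitTokens line]) := by
  unfold pvStepA
  cases htoks : pvSplitTokens line with
  | nil => simp [pvIsSep, htoks] at hsep
  | cons t0 ts =>
    simp only [htoks]
    simp only [pvIsSep, htoks, Bool.or_eq_false_iff, beq_eq_false_iff_ne, ne_eq] at hsep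
    rw [if_neg (by
      rintro (h | h)
      · exact hsep.1 ((pv_len_zero_iff t0).mp h)
      · rw [hsep.2] at h; exact Bool.false_ne_true h)]
    simp [pvLastTok, List.map_append]

lemma pv_stepB_sep (line : String) (parts : List String) (sent : List (List String))
    (hsep : pvIsSep line = true) :
    pvStepB (parts, sent) line = (parts ++ pvRenderSentence sent ++ [line], []) := by
  unfold pvStepB
  cases htoks : pvSplitTokens line with
  | nil => simp only [htoks]
  | cons t0 ts =>
    simp only [htoks]
    simp only [pvIsSep, htoks, Bool.or_eq_true, beq_iff_eq] at hsep
    rw [if_pos hsep]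

lemma pv_stepB_tok (line : String) (parts : List String) (sent : List (List String))
    (hsep : pvIsSep line = false) :
    pvStepB (parts, sent) line = (parts, sent ++ [pvSplitTokens line]) := by
  unfold pvStepB
  cases htoks : pvSplitTokens line with
  | nil => simp [pvIsSep, htoks] at hsep
  | cons t0 ts =>
    simp only [htoks]
    simp only [pvIsSep, htoks, Bool.or_eq_false_iff, beq_eq_false_iff_ne, ne_eq] at hsep
    rw [if_neg (by
      rintro (h | h)
      · exact hsep.1 h
      · rw [hsep.2] at h; exact Bool.false_ne_true h)]

-- ---- outer loop ----
lemma pv_outer (rest : List String) (out : String) (parts : List String)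
    (sent : List (List String))
    (hout : out = PySem.Str.join "" parts)
    (hvs : ∀ toks ∈ sent, pvValidBIO (pvLastTok toks) = true)
    (hvr : ∀ l ∈ rest, pvIsSep l = false → pvValidBIO (pvLineLabel l) = true)
    (hchain : List.IsChain (fun a b => ¬(pvIsSep a = true ∧ pvIsSep b = true)) rest)
    (hne : rest = [] → sent ≠ [])
    (hhead : ∀ x ∈ rest.head?, pvIsSep x = true → sent ≠ [])
    (hlast : ∀ x ∈ rest.getLast?, pvIsSep x = false) :
    (let st := rest.foldl pvStepA (out, sent.map pvLastTok, sent)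
     output_conll_lines_with_bioes st.2.2 st.2.1 st.1) =
    (let st := rest.foldl pvStepB (parts, sent)
     PySem.Str.join "" (st.1 ++ pvRenderSentence st.2)) := by
  induction rest generalizing out parts sent with
  | nil =>
    simp only [List.foldl_nil]
    rw [pv_flush sent out (hne rfl) hvs, hout, pv_join_append]
  | cons line t ih =>
    simp only [List.foldl_cons]
    by_cases hsep : pvIsSep line = true
    · have hs : sent ≠ [] := hhead line (by simp) hsep
      rw [pv_stepA_sep line out sent hsep hs hvs, pv_stepB_sep line parts sent hsep]
      have := ih (out ++ PySem.Str.join "" (pvRenderSentence sent) ++ line)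
        (parts ++ pvRenderSentence sent ++ [line]) []
        (by rw [hout, pv_join_append, pv_join_append, pv_join_single])
        (by simp)
        (fun l hl => hvr l (List.mem_cons_of_mem _ hl))
        (List.IsChain.of_cons hchain)
        (by
          intro ht
          exfalso
          have : (line :: t).getLast? = some line := by rw [ht]; rfl
          have := hlast line (by rw [this]; rfl)
          rw [hsep] at this
          simp at this)
        (by
          intro x hx hsx
          exfalso
          cases t with
          | nil => simp at hx
          | cons y t' =>
            simp only [List.head?_cons, Option.mem_some_iff] at hx
            subst hx
            exact (List.IsChain.rel hchain) ⟨hsep, hsx⟩)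
        (by
          intro x hx
          apply hlast
          cases t with
          | nil => simp at hx
          | cons y t' => rw [List.getLast?_cons_cons]; exact hx)
      exact this
    · rw [Bool.not_eq_true] at hsep
      rw [pv_stepA_tok line out sent hsep, pv_stepB_tok line parts sent hsep]
      have := ih out parts (sent ++ [pvSplitTokens line])
        hout
        (by
          intro toks htoks
          rcases List.mem_append.mp htoks with h | h
          · exact hvs toks h
          · rw [List.mem_singleton.mp h, ← pv_lineLabel_eq]
            exact hvr line (by simp) hsep)
        (fun l hl => hvr l (List.mem_cons_of_mem _ hl))
        (List.IsChain.of_cons hchain)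
        (fun _ => by simp)
        (fun x _ _ => by simp)
        (by
          intro x hx
          apply hlast
          cases t with
          | nil => simp at hx
          | cons y t' => rw [List.getLast?_cons_cons]; exact hx)
      exact this

-- ===== VERDICT (by name: the statement is the Claim_ definition above) =====
theorem convert_conll_from_bio_to_bioes_spec : Claim_equal_convert_conll_from_bio_to_bioes := by
  intro text _ hpre
  obtain ⟨hne, hhead, hlast, hchain, hval⟩ := hpre
  unfold Spec_convert_conll_from_bio_to_bioes
  unfold convert_conll_from_bio_to_bioes convert_conll_from_bio_to_bioes_alt
  have := pv_outer (PySem.Str.splitlines text) "" [] []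
    (by rw [pv_join_nil]) (by simp)
    (fun l hl => hval l hl)
    hchain
    (fun h => absurd h hne)
    (by
      intro x hx hsepx
      exfalso
      cases hh : (PySem.Str.splitlines text).head? with
      | none => rw [hh] at hx; simp at hx
      | some y =>
        rw [hh] at hx
        rw [Option.mem_some_iff] at hx
        subst hx
        rw [hh] at hhead
        simp only [Option.all_some, Bool.not_eq_true'] at hhead
        rw [hhead] at hsepx
        simp at hsepx)
    (by
      intro x hx
      cases hh : (PySem.Str.splitlines text).getLast? with
      | none => rw [hh] at hx; simp at hx
      | some y =>
        rw [hh] at hx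
        rw [Option.mem_some_iff] at hx
        subst hx
        rw [hh] at hlast
        simp only [Option.all_some, Bool.not_eq_true'] at hlast
        exact hlast)
  simpa using this
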